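-- pv_equiv track=rewrite | github.com/servicedyno/Nomadly-EMAIL-IVR | scripts/extract_full_i18n.py | find_template_literal_end
-- ===== SOURCE A (Python) =====
-- def find_template_literal_end(text, start):
--     """Find the end of a template literal."""
--     i = start + 1
--     depth = 0
--     while i < len(text):
--         c = text[i]
--         if c == '\\':
--             i += 2
--             continue
--         if depth == 0 and c == '`':
--             return i
--         if c == '$' and i + 1 < len(text) and text[i + 1] == '{':
--             depth += 1
--             i += 2
--             continue
--         if depth > 0:
--             if c == '{':
--                 depth += 1
--             elif c == '}':
--                 depth -= 1
--             elif c == '`':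
--                 nested_end = find_template_literal_end(text, i)
--                 if nested_end is not None:
--                     i = nested_end + 1
--                     continue
--                 else:
--                     return None
--             elif c in ("'", '"'):
--                 quote = c
--                 i += 1
--                 while i < len(text) and text[i] != quote:
--                     if text[i] == '\\':
--                         i += 1
--                     i += 1
--         i += 1
--     return None
-- ===== SOURCE B (Python) =====
-- def find_template_literal_end(text, start):
--     """Find the end of a template literal (iterative: explicit stack of saved depths instead of recursion)."""
--     i = start + 1
--     depth = 0
--     stack = []
--     n = len(text)
--     while i < n:
--         c = text[i]
--         if c == '\\':
--             i += 2
--             continue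
--         if depth == 0 and c == '`':
--             if not stack:
--                 return i
--             depth = stack.pop()
--             i += 1
--             continue
--         if c == '$' and i + 1 < n and text[i + 1] == '{':
--             depth += 1
--             i += 2
--             continue
--         if depth > 0:
--             if c == '{':
--                 depth += 1
--             elif c == '}':
--                 depth -= 1
--             elif c == '`':
--                 stack.append(depth)
--                 depth = 0
--             elif c in ("'", '"'):
--                 quote = c
--                 i += 1
--                 while i < n and text[i] != quote:
--                     if text[i] == '\\':
--                         i += 1
--                     i += 1
--         i += 1
--     return None
-- ===== Notes on version B (the rewrite author's own statement) =====
-- stated objective: alternative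
-- what changed: Replaces A's recursion for nested template literals (a fresh scan call per nested backtick) with a single linear loop that pushes the current ${...} depth onto an explicit stack when a nested literal opens and pops it when the nested literal closes.
-- outside the precondition, e.g. on find_template_literal_end('`x`', -6): A raises IndexError, B raises IndexError
import Mathlib
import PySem

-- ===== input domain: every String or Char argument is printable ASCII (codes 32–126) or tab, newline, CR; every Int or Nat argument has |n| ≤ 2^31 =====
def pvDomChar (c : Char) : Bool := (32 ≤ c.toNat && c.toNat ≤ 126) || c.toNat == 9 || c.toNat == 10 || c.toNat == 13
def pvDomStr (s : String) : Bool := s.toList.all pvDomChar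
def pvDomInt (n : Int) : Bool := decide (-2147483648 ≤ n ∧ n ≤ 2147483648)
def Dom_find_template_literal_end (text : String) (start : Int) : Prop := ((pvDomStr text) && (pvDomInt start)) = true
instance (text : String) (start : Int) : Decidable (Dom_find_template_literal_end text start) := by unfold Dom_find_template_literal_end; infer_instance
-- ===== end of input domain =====

-- B replaces A's recursive nested-template call by one linear loop with an explicit stack of
-- saved depths (objective: alternative decomposition, same cost).

-- ===== PORT A =====

-- tiny arithmetic lemmas cited by name inside the ports (termination and index monotonicity);
-- keeping these proofs out of the definition bodies keeps the port terms small
theorem pv_le_add1 {i v : Int} (h : i + 1 ≤ v) : i ≤ v := by omega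
theorem pv_le_add2 {i v : Int} (h : i + 2 ≤ v) : i ≤ v := by omega
theorem pv_le_chain {i j v : Int} (h1 : i + 1 ≤ j) (h2 : j + 1 ≤ v) : i ≤ v := by omega
theorem pv_dec1 {L i : Int} (h : i < L) : (L - (i + 1)).toNat < (L - i).toNat := by omega
theorem pv_dec2 {L i : Int} (h : i < L) : (L - (i + 2)).toNat < (L - i).toNat := by omega
theorem pv_decj {L i j : Int} (h : i < L) (hj : i + 1 ≤ j) :
    (L - (j + 1)).toNat < (L - i).toNat := by omega

-- A's inner quoted-string scanner: while i < len and text[i] != quote: (skip '\'); returns final i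
def pvA_skip (cs : List Char) (q : Char) (i : Int) : Int :=
  if h : i < (cs.length : Int) then
    match PySem.List.pyGet? cs i with
    | none => i        -- IndexError in Python (i < -len); unreachable inside Pre_
    | some c =>
      if c = q then i
      else if c = '\\' then pvA_skip cs q (i + 2)
      else pvA_skip cs q (i + 1)
  else i
termination_by ((cs.length : Int) - i).toNat
decreasing_by
  · exact pv_dec2 h
  · exact pv_dec1 h

theorem pvA_skip_ge (cs : List Char) (q : Char) (i : Int) : i ≤ pvA_skip cs q i := by
  fun_induction pvA_skip cs q i <;> omega

-- A's main loop; the subtype records only that the returned index is ≥ i (needed for termination)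
def pvA_loop (cs : List Char) (i depth : Int) : Option { j : Int // i ≤ j } :=
  if h : i < (cs.length : Int) then
    match PySem.List.pyGet? cs i with
    | none => none     -- IndexError in Python (i < -len); unreachable inside Pre_
    | some c =>
      if c = '\\' then
        (pvA_loop cs (i + 2) depth).map (fun ⟨v, hv⟩ => ⟨v, pv_le_add2 hv⟩)
      else if depth = 0 ∧ c = '`' then
        some ⟨i, le_refl i⟩
      else if c = '$' ∧ i + 1 < (cs.length : Int) ∧ PySem.List.pyGet? cs (i + 1) = some '{' then
        (pvA_loop cs (i + 2) (depth + 1)).map (fun ⟨v, hv⟩ => ⟨v, pv_le_add2 hv⟩)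
      else if depth > 0 then
        if c = '{' then
          (pvA_loop cs (i + 1) (depth + 1)).map (fun ⟨v, hv⟩ => ⟨v, pv_le_add1 hv⟩)
        else if c = '}' then
          (pvA_loop cs (i + 1) (depth - 1)).map (fun ⟨v, hv⟩ => ⟨v, pv_le_add1 hv⟩)
        else if c = '`' then
          match pvA_loop cs (i + 1) 0 with      -- recursive call find_template_literal_end(text, i)
          | some ⟨j, hj⟩ =>
              (pvA_loop cs (j + 1) depth).map (fun ⟨v, hv⟩ => ⟨v, pv_le_chain hj hv⟩)
          | none => none
        else if c = '\'' ∨ c = '"' then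
          (pvA_loop cs (pvA_skip cs c (i + 1) + 1) depth).map
            (fun ⟨v, hv⟩ => ⟨v, pv_le_chain (pvA_skip_ge cs c (i + 1)) hv⟩)
        else
          (pvA_loop cs (i + 1) depth).map (fun ⟨v, hv⟩ => ⟨v, pv_le_add1 hv⟩)
      else
        (pvA_loop cs (i + 1) depth).map (fun ⟨v, hv⟩ => ⟨v, pv_le_add1 hv⟩)
  else none
termination_by ((cs.length : Int) - i).toNat
decreasing_by
  all_goals first
    | exact pv_dec2 h
    | exact pv_dec1 h
    | exact pv_decj h hj
    | exact pv_decj h (pvA_skip_ge cs c (i + 1))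

def find_template_literal_end (text : String) (start : Int) : Option Int :=
  (pvA_loop text.toList (start + 1) 0).map Subtype.val

-- ===== PORT B =====

-- B's quoted-string scanner (same inline scanner as in Source B)
def pvB_skip (cs : List Char) (q : Char) (i : Int) : Int :=
  if h : i < (cs.length : Int) then
    match PySem.List.pyGet? cs i with
    | none => i        -- IndexError in Python; unreachable inside Pre_
    | some c =>
      if c = q then i
      else if c = '\\' then pvB_skip cs q (i + 2)
      else pvB_skip cs q (i + 1)
  else i
termination_by ((cs.length : Int) - i).toNat
decreasing_by
  · exact pv_dec2 h
  · exact pv_dec1 h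

theorem pvB_skip_ge (cs : List Char) (q : Char) (i : Int) : i ≤ pvB_skip cs q i := by
  fun_induction pvB_skip cs q i <;> omega

-- B's single loop: `stack` holds the saved depths of enclosing template literals
def pvB_loop (cs : List Char) (i depth : Int) (stack : List Int) : Option Int :=
  if h : i < (cs.length : Int) then
    match PySem.List.pyGet? cs i with
    | none => none     -- IndexError in Python; unreachable inside Pre_
    | some c =>
      if c = '\\' then pvB_loop cs (i + 2) depth stack
      else if depth = 0 ∧ c = '`' then
        match stack with
        | [] => some i
        | d :: rest => pvB_loop cs (i + 1) d rest
      else if c = '$' ∧ i + 1 < (cs.length : Int) ∧ PySem.List.pyGet? cs (i + 1) = some '{' then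
        pvB_loop cs (i + 2) (depth + 1) stack
      else if depth > 0 then
        if c = '{' then pvB_loop cs (i + 1) (depth + 1) stack
        else if c = '}' then pvB_loop cs (i + 1) (depth - 1) stack
        else if c = '`' then pvB_loop cs (i + 1) 0 (depth :: stack)
        else if c = '\'' ∨ c = '"' then
          pvB_loop cs (pvB_skip cs c (i + 1) + 1) depth stack
        else pvB_loop cs (i + 1) depth stack
      else pvB_loop cs (i + 1) depth stack
  else none
termination_by ((cs.length : Int) - i).toNat
decreasing_by
  all_goals first
    | exact pv_dec2 h
    | exact pv_dec1 h
    | exact pv_decj h (pvB_skip_ge cs c (i + 1))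

def find_template_literal_end_alt (text : String) (start : Int) : Option Int :=
  pvB_loop text.toList (start + 1) 0 []

-- ===== PRECONDITION & SPEC =====
-- Pre_ excludes exactly the inputs where Python A raises IndexError: the first read text[start+1]
-- with start+1 < -len(text) is out of range (B raises identically there).
def Pre_find_template_literal_end (text : String) (start : Int) : Prop :=
  -((text.length : Int) + 1) ≤ start
instance (text : String) (start : Int) : Decidable (Pre_find_template_literal_end text start) := by
  unfold Pre_find_template_literal_end; infer_instance

def pvWitness_find_template_literal_end : String × Int := ("`a${ `x` }b`", 0)

def Spec_find_template_literal_end (text : String) (start : Int) (out : Option Int) : Prop := out = find_template_literal_end_alt text start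
instance (text : String) (start : Int) (out : Option Int) : Decidable (Spec_find_template_literal_end text start out) := by unfold Spec_find_template_literal_end; infer_instance

-- ===== CLAIM (what is proved, stated in full; the proofs are below) =====
def Claim_equal_find_template_literal_end : Prop := ∀ (text : String) (start : Int), Dom_find_template_literal_end text start → Pre_find_template_literal_end text start → Spec_find_template_literal_end text start (find_template_literal_end text start)

-- ===== LEMMAS AND PROOFS =====

theorem pv_skip_eq (cs : List Char) (q : Char) (i : Int) :
    pvB_skip cs q i = pvA_skip cs q i := by
  fun_induction pvA_skip cs q i <;> (rw [pvB_skip.eq_def]; simp_all)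

-- The simulation invariant: running B's loop with a stack of saved depths computes A's recursion
-- with those continuations.
theorem pvB_eq_pvA (cs : List Char) :
    ∀ (n : Nat) (i depth : Int) (stack : List Int),
      ((cs.length : Int) - i).toNat ≤ n →
      pvB_loop cs i depth stack =
        (match pvA_loop cs i depth with
         | none => none
         | some j =>
             match stack with
             | [] => some j.1
             | d :: rest => pvB_loop cs (j.1 + 1) d rest) := by
  intro n
  induction n with
  | zero =>
    intro i depth stack hn
    have h : ¬ i < (cs.length : Int) := by omega
    rw [pvB_loop.eq_def, pvA_loop.eq_def]
    simp [h]
  | succ n ih =>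
    intro i depth stack hn
    by_cases h : i < (cs.length : Int)
    · rw [pvB_loop.eq_def, pvA_loop.eq_def]
      simp only [dif_pos h]
      cases hm : PySem.List.pyGet? cs i with
      | none => simp
      | some c =>
        simp only
        by_cases h1 : c = '\\'
        · simp only [if_pos h1]
          rw [ih (i + 2) depth stack (by omega)]
          cases pvA_loop cs (i + 2) depth <;> simp
        · simp only [if_neg h1]
          by_cases h2 : depth = 0 ∧ c = '`'
          · cases stack <;> simp [if_pos h2]
          · simp only [if_neg h2]
            by_cases h3 : c = '$' ∧ i + 1 < (cs.length : Int) ∧ PySem.List.pyGet? cs (i + 1) = some '{'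
            · simp only [if_pos h3]
              rw [ih (i + 2) (depth + 1) stack (by omega)]
              cases pvA_loop cs (i + 2) (depth + 1) <;> simp
            · simp only [if_neg h3]
              by_cases h4 : depth > 0
              · simp only [if_pos h4]
                by_cases h5 : c = '{'
                · simp only [if_pos h5]
                  rw [ih (i + 1) (depth + 1) stack (by omega)]
                  cases pvA_loop cs (i + 1) (depth + 1) <;> simp
                · simp only [if_neg h5]
                  by_cases h6 : c = '}'
                  · simp only [if_pos h6]
                    rw [ih (i + 1) (depth - 1) stack (by omega)]
                    cases pvA_loop cs (i + 1) (depth - 1) <;> simp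
                  · simp only [if_neg h6]
                    by_cases h7 : c = '`'
                    · simp only [if_pos h7]
                      rw [ih (i + 1) 0 (depth :: stack) (by omega)]
                      cases hA : pvA_loop cs (i + 1) 0 with
                      | none => simp
                      | some j =>
                        obtain ⟨j, hj⟩ := j
                        simp only
                        rw [ih (j + 1) depth stack (by omega)]
                        cases pvA_loop cs (j + 1) depth <;> simp
                    · simp only [if_neg h7]
                      by_cases h8 : c = '\'' ∨ c = '"'
                      · simp only [if_pos h8]
                        rw [pv_skip_eq]
                        have hs := pvA_skip_ge cs c (i + 1)
                        rw [ih (pvA_skip cs c (i + 1) + 1) depth stack (by omega)]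
                        cases pvA_loop cs (pvA_skip cs c (i + 1) + 1) depth <;> simp
                      · simp only [if_neg h8]
                        rw [ih (i + 1) depth stack (by omega)]
                        cases pvA_loop cs (i + 1) depth <;> simp
              · simp only [if_neg h4]
                rw [ih (i + 1) depth stack (by omega)]
                cases pvA_loop cs (i + 1) depth <;> simp
    · rw [pvB_loop.eq_def, pvA_loop.eq_def]
      simp [h]

-- ===== VERDICT (by name: the statement is the Claim_ definition above) =====
theorem find_template_literal_end_spec : Claim_equal_find_template_literal_end := by
  intro text start _ _
  unfold Spec_find_template_literal_end find_template_literal_end find_template_literal_end_alt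
  rw [pvB_eq_pvA text.toList ((text.toList.length : Int) - (start + 1)).toNat (start + 1) 0 []
      (by omega)]
  cases pvA_loop text.toList (start + 1) 0 <;> simp [Option.map]
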